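-- pv_equiv track=rewrite | github.com/philip-3000/interview-prep | Problems/ConcatenationSum/concat_sum.py | concatenation_sum
-- ===== SOURCE A (Python) =====
-- from typing import List
--
-- def concatenation_sum(a:List[int])->int:
--     total_sum = 0
--
--     # first, let's collect the sum of all the elements
--     sum_of_all_elements = sum(a)
--
--     # our 'smaller sum' is just the sum of all elements multiplied by the
--     # length of the array
--     smaller_sum = len(a) * sum_of_all_elements
--
--     # now we need to go through and calculate the powers of 10 times the sum of
--     # all elements in a, and accumulate these
--     power_sums = 0
--     for i in a:
--         # calculate 10 to the power of the number of digits in i.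
--         power_of_ten = 10**(len(str(i)))
--
--         # now multiply that power of 10 by the sum of all elements, and accumulate these
--         # values
--         power_sums += (power_of_ten * sum_of_all_elements)
--
--
--     # add the two together now
--     total_sum = smaller_sum + power_sums
--
--     return total_sum
-- ===== SOURCE B (Python) =====
-- from typing import List
--
-- def concatenation_sum(a: List[int]) -> int:
--     total = 0
--     for x in a:
--         for y in a:
--             total += x * 10 ** len(str(y)) + y
--     return total
-- ===== Notes on version B (the rewrite author's own statement) =====
-- stated objective: simpler
-- what changed: B sums every ordered pair's concatenation x*10^len(str(y))+y directly with a double loop, instead of A's factored closed form (len*sum + sum of powers of ten times sum).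
import Mathlib
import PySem

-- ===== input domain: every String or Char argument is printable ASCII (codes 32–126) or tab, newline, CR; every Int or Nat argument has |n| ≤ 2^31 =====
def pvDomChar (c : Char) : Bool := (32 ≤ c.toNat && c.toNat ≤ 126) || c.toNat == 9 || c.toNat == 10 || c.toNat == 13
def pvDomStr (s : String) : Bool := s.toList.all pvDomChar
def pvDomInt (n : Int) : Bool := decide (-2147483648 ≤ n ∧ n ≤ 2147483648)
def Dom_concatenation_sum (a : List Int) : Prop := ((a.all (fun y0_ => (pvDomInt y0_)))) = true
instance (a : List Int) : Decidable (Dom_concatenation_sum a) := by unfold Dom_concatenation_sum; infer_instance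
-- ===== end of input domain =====

-- B sums every ordered pair's concatenation x*10^len(str(y))+y with a double loop instead of A's factored closed form; objective: simpler.


-- ===== PORT A =====
-- len(str(i)) : number of characters of str(i) (includes a leading '-')
def pvStrLen (i : Int) : Nat := (PySem.Int.toChars i).length

def concatenation_sum (a : List Int) : Int :=
  let sum_of_all_elements : Int := a.foldl (fun acc x => acc + x) 0
  let smaller_sum : Int := (a.length : Int) * sum_of_all_elements
  let power_sums : Int :=
    a.foldl (fun acc i => acc + ((10 : Int) ^ pvStrLen i) * sum_of_all_elements) 0
  smaller_sum + power_sums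

-- ===== PORT B =====
def concatenation_sum_alt (a : List Int) : Int :=
  a.foldl (fun total x =>
    a.foldl (fun total y => total + (x * (10 : Int) ^ pvStrLen y + y)) total) 0

-- ===== PRECONDITION & SPEC =====
def Spec_concatenation_sum (a : List Int) (out : Int) : Prop := out = concatenation_sum_alt a
instance (a : List Int) (out : Int) : Decidable (Spec_concatenation_sum a out) := by unfold Spec_concatenation_sum; infer_instance

-- ===== CLAIM (what is proved, stated in full; the proofs are below) =====
def Claim_equal_concatenation_sum : Prop := ∀ (a : List Int), Dom_concatenation_sum a → Spec_concatenation_sum a (concatenation_sum a)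

-- ===== LEMMAS AND PROOFS =====

-- Python's sum(a): the running-total fold is the list sum
theorem pv_foldl_sum (l : List Int) (init : Int) :
    l.foldl (fun acc x => acc + x) init = init + l.sum := by
  induction l generalizing init with
  | nil => simp
  | cons h t ih => simp [ih]; ring

-- Σ_y (x * f y + y) over l equals x * Σ f + Σ l
theorem pv_sum_map_pair (l : List Int) (x : Int) (f : Int → Int) :
    (l.map (fun y => x * f y + y)).sum = x * (l.map f).sum + l.sum := by
  induction l with
  | nil => simp
  | cons h t ih => simp [ih]; ring

-- Σ_i (f i * S) = (Σ f) * S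
theorem pv_sum_map_mul (l : List Int) (S : Int) (f : Int → Int) :
    (l.map (fun i => f i * S)).sum = (l.map f).sum * S := by
  induction l with
  | nil => simp
  | cons h t ih => simp [ih]; ring

-- Σ_x (x * P + S) = (Σ l) * P + |l| * S
theorem pv_sum_map_affine (l : List Int) (P S : Int) :
    (l.map (fun x => x * P + S)).sum = l.sum * P + (l.length : Int) * S := by
  induction l with
  | nil => simp
  | cons h t ih => simp [ih]; ring

-- ===== VERDICT (by name: the statement is the Claim_ definition above) =====
theorem concatenation_sum_spec : Claim_equal_concatenation_sum := by
  intro a _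
  unfold Spec_concatenation_sum concatenation_sum concatenation_sum_alt
  simp only [PySem.List.foldl_add, zero_add]
  simp only [pv_foldl_sum, zero_add]
  rw [pv_sum_map_mul]
  simp only [pv_sum_map_pair]
  rw [pv_sum_map_affine]
  ring
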